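-- pv_equiv track=rewrite | github.com/Karlguo/style_tran | tokenization.py | convert_by_vocab_clean
-- ===== SOURCE A (Python) =====
-- def convert_by_vocab_clean(vocab, items):
--     """Converts a sequence of [tokens|ids] using the vocab.
--     自动过滤<sos> <eos>及其之后的文本
--     """
--     output = []
--     for item in items:
--         if vocab[item] == "<sos>":
--             continue
--         if vocab[item] == "<eos>":
--             break
--         output.append(vocab[item])
--     return output
-- ===== SOURCE B (Python) =====
-- def convert_by_vocab_clean(vocab, items):
--     """Invert the vocab once into id-sets for the two control tokens, then work in
--     id space: cut items at the first <eos>-id, drop <sos>-ids, translate the rest."""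
--     eos_ids = {k for k in vocab if vocab[k] == "<eos>"}
--     sos_ids = {k for k in vocab if vocab[k] == "<sos>"}
--     cut = next((i for i, x in enumerate(items) if x in eos_ids), len(items))
--     return [vocab[x] for x in items[:cut] if x not in sos_ids]
-- ===== Notes on version B (the rewrite author's own statement) =====
-- stated objective: alternative
-- what changed: B never compares looked-up tokens inside the item loop: it first inverts the vocab into the id-sets of <eos> and <sos>, then finds the cut position by id-set membership, slices items there, filters out <sos>-ids and only then translates the surviving ids through the vocab.
import Mathlib
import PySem

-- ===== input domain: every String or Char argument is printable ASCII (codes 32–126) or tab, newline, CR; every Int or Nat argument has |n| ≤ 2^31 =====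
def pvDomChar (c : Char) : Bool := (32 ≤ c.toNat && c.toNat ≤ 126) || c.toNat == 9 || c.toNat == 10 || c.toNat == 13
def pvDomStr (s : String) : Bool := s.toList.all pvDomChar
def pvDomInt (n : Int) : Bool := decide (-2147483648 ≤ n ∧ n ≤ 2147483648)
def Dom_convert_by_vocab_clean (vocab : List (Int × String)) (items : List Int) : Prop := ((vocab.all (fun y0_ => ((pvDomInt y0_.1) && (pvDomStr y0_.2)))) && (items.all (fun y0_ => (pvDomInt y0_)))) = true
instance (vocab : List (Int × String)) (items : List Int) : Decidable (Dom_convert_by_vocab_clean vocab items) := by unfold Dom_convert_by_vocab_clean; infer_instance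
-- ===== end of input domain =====

-- B replaces A's token-comparing loop by an inverted-vocab pipeline: build the id-sets of
-- <eos>/<sos> once, cut items at the first <eos>-id, filter out <sos>-ids, then translate.


-- ===== PORT A =====
-- A's for-loop with continue/break, as structural recursion over items;
-- vocab[item] is ported as Dict.getD with default "" (Pre_ excludes the KeyError inputs,
-- so the default is never the value used).
def convert_by_vocab_clean (vocab : List (Int × String)) (items : List Int) : List String :=
  match items with
  | [] => []
  | item :: rest =>
    if (PySem.Dict.mk vocab).getD item "" == "<sos>" then
      convert_by_vocab_clean vocab rest
    else if (PySem.Dict.mk vocab).getD item "" == "<eos>" then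
      []
    else
      (PySem.Dict.mk vocab).getD item "" :: convert_by_vocab_clean vocab rest

-- ===== PORT B =====
-- B's pipeline: invert the vocab into the id-sets of the control tokens, find the cut
-- index by id-set membership, slice, filter out <sos>-ids, translate the survivors.
def convert_by_vocab_clean_alt (vocab : List (Int × String)) (items : List Int) : List String :=
  let d := PySem.Dict.mk vocab
  let eosIds : PySem.Set Int := PySem.Set.ofList (d.keys.filter (fun k => d.getD k "" == "<eos>"))
  let sosIds : PySem.Set Int := PySem.Set.ofList (d.keys.filter (fun k => d.getD k "" == "<sos>"))
  let cut := items.findIdx (fun x => eosIds.contains x)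
  ((items.take cut).filter (fun x => !(sosIds.contains x))).map (fun x => d.getD x "")

-- ===== PRECONDITION & SPEC =====
-- Pre_ excludes exactly the inputs where Python A raises KeyError: an item not in vocab
-- occurring before (strictly: not after) the first item whose token is "<eos>".
def Pre_convert_by_vocab_clean (vocab : List (Int × String)) (items : List Int) : Prop :=
  ∀ x ∈ items.takeWhile (fun it => (PySem.Dict.mk vocab).get? it != some "<eos>"),
    ((PySem.Dict.mk vocab).get? x).isSome
instance (vocab : List (Int × String)) (items : List Int) : Decidable (Pre_convert_by_vocab_clean vocab items) := by unfold Pre_convert_by_vocab_clean; infer_instance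

def pvWitness_convert_by_vocab_clean : (List (Int × String)) × List Int :=
  ([(0, "<sos>"), (1, "a"), (2, "b"), (3, "<eos>")], [0, 1, 2, 3, 9])

def Spec_convert_by_vocab_clean (vocab : List (Int × String)) (items : List Int) (out : List String) : Prop := out = convert_by_vocab_clean_alt vocab items
instance (vocab : List (Int × String)) (items : List Int) (out : List String) : Decidable (Spec_convert_by_vocab_clean vocab items out) := by unfold Spec_convert_by_vocab_clean; infer_instance

-- ===== CLAIM (what is proved, stated in full; the proofs are below) =====
def Claim_equal_convert_by_vocab_clean : Prop := ∀ (vocab : List (Int × String)) (items : List Int), Dom_convert_by_vocab_clean vocab items → Pre_convert_by_vocab_clean vocab items → Spec_convert_by_vocab_clean vocab items (convert_by_vocab_clean vocab items)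

-- ===== LEMMAS AND PROOFS =====
-- The inverted id-set of a non-empty token s contains x iff the (defaulted) lookup of x is s:
-- a missing key defaults to "" ≠ s, a present key is among vocab's keys.
theorem mem_ids (vocab : List (Int × String)) (s : String) (hs : s ≠ "") (x : Int) :
    x ∈ PySem.Set.ofList (List.filter (fun k => (PySem.Dict.mk vocab).getD k "" == s)
          (vocab.map (fun p => p.1)))
      ↔ (PySem.Dict.mk vocab).getD x "" = s := by
  rw [PySem.Set.mem_ofList, List.mem_filter]
  constructor
  · rintro ⟨-, hb⟩
    exact eq_of_beq hb
  · intro h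
    refine ⟨?_, by simp [h]⟩
    have hc : (PySem.Dict.mk vocab).contains x = true := by
      cases hcc : (PySem.Dict.mk vocab).contains x with
      | true => rfl
      | false =>
        have h0 := PySem.Dict.getD_of_not_contains (d := PySem.Dict.mk vocab) (k := x)
          (d0 := "") hcc
        exact absurd (h.symm.trans h0) hs
    have hk := (PySem.Dict.contains_iff_mem_keys (PySem.Dict.mk vocab) x).mp hc
    simpa [PySem.Dict.keys] using hk

-- With getD's default "", both ports treat a missing key as an ordinary token "",
-- so they agree on ALL inputs; the unconditional equation suffices.
theorem conv_eq (vocab : List (Int × String)) (items : List Int) :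
    convert_by_vocab_clean vocab items = convert_by_vocab_clean_alt vocab items := by
  induction items with
  | nil => rfl
  | cons item rest ih =>
    simp only [convert_by_vocab_clean, convert_by_vocab_clean_alt] at *
    rw [List.findIdx_cons]
    by_cases he : (PySem.Dict.mk vocab).getD item "" = "<eos>"
    · simp [mem_ids vocab "<eos>" (by decide), he]
    · by_cases hsos : (PySem.Dict.mk vocab).getD item "" = "<sos>"
      · simp [mem_ids vocab "<eos>" (by decide), mem_ids vocab "<sos>" (by decide), hsos, ih]
      · simp [mem_ids vocab "<eos>" (by decide), mem_ids vocab "<sos>" (by decide), he, hsos, ih]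

-- ===== VERDICT (by name: the statement is the Claim_ definition above) =====
theorem convert_by_vocab_clean_spec : Claim_equal_convert_by_vocab_clean := by
  intro vocab items _ _
  exact conv_eq vocab items
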